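-- pv_equiv track=rewrite | github.com/hnjog/Algorithm | 백준/Gold/2504. 괄호의 값/괄호의 값.py | checkCalc
-- ===== SOURCE A (Python) =====
-- def checkCalc(com)->int:
--     stack = []
--     resultValue = 0
--     tempValue = 1 # result 에 더하기전의 임시변수
--
--     for i in range(len(com)):
--         if com[i] == '(':
--             tempValue *= 2
--             stack.append(com[i])
--         elif com[i] == '[':
--             tempValue *= 3
--             stack.append(com[i])
--         elif com[i] == ')':
--             if not stack or stack[-1]!='(':
--                 resultValue = 0
--                 break
--             if com[i-1] == '(':
--                 resultValue += tempValue
--             tempValue //= 2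
--             stack.pop()
--         elif com[i] == ']':
--             if not stack or stack[-1]!='[':
--                 resultValue = 0
--                 break
--             if com[i-1] == '[':
--                 resultValue += tempValue
--             tempValue //= 3
--             stack.pop()
--
--     if stack:
--         resultValue = 0
--
--     return resultValue
-- ===== SOURCE B (Python) =====
-- def checkCalc(com) -> int:
--     # stack of (open_char, partial_sum_of_children); no running product, no division
--     stack = []
--     total = 0
--     prev = ''
--     for ch in com:
--         if ch == '(' or ch == '[':
--             stack.append((ch, 0))
--         elif ch == ')' or ch == ']':
--             opener, factor = ('(', 2) if ch == ')' else ('[', 3)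
--             if not stack or stack[-1][0] != opener:
--                 return 0
--             _, s = stack.pop()
--             v = factor if prev == opener else factor * s
--             if stack:
--                 c, p = stack.pop()
--                 stack.append((c, p + v))
--             else:
--                 total += v
--         prev = ch
--     return 0 if stack else total
-- ===== Notes on version B (the rewrite author's own statement) =====
-- stated objective: alternative
-- what changed: Replaces A's running product-of-factors with floor-division restore and a char stack by a single stack of (open-bracket, partial sum) frames that folds each closed pair's value into its parent, with early return on mismatch and no division or multiplication-accumulator.
import Mathlib
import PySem

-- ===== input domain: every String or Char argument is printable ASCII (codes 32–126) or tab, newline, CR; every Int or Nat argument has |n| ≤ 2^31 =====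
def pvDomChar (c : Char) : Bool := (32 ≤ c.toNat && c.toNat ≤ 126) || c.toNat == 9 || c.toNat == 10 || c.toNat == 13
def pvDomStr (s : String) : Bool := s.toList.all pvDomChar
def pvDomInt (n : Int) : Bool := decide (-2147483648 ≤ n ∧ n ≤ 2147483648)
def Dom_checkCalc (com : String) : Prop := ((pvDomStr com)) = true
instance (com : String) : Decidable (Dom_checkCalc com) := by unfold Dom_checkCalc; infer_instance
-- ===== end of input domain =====

-- B replaces A's running factor-product (with floor-division restore) by a stack of
-- (open-bracket, partial-sum) frames folded into their parent on close; same O(n) cost.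

set_option maxHeartbeats 1000000


-- ===== PORT A =====
-- literal port of A's loop: `l` is the full char list (for com[i-1]), `cur` the chars
-- still to process starting at index i; state = (stack, resultValue, tempValue);
-- `break` is modelled by returning the state immediately (resultValue set to 0).
def checkCalcLoop (l : List Char) (cur : List Char) (i : Int) (stack : List Char)
    (res temp : Int) : List Char × Int :=
  match cur with
  | [] => (stack, res)
  | ch :: rest =>
    if ch = '(' then
      checkCalcLoop l rest (i + 1) (ch :: stack) res (temp * 2)
    else if ch = '[' then
      checkCalcLoop l rest (i + 1) (ch :: stack) res (temp * 3)
    else if ch = ')' then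
      if stack.head? ≠ some '(' then (stack, 0)
      else
        let res' := if PySem.List.pyGet? l (i - 1) = some '(' then res + temp else res
        checkCalcLoop l rest (i + 1) stack.tail res' (PySem.Int.floordiv temp 2)
    else if ch = ']' then
      if stack.head? ≠ some '[' then (stack, 0)
      else
        let res' := if PySem.List.pyGet? l (i - 1) = some '[' then res + temp else res
        checkCalcLoop l rest (i + 1) stack.tail res' (PySem.Int.floordiv temp 3)
    else
      checkCalcLoop l rest (i + 1) stack res temp
termination_by structural cur

def checkCalc (com : String) : Int :=
  match checkCalcLoop com.toList com.toList 0 [] 0 1 with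
  | (stack, res) => if stack.isEmpty then res else 0

-- ===== PORT B =====
-- literal port of B: stack of (open bracket, partial sum of completed children),
-- `prev` is the previously seen character (none before the first).
def checkCalcAltLoop (cur : List Char) (prev : Option Char) (stack : List (Char × Int))
    (total : Int) : Int :=
  match cur with
  | [] => if stack.isEmpty then total else 0
  | ch :: rest =>
    if ch = '(' ∨ ch = '[' then
      checkCalcAltLoop rest (some ch) ((ch, 0) :: stack) total
    else if ch = ')' ∨ ch = ']' then
      let opener : Char := if ch = ')' then '(' else '['
      let factor : Int := if ch = ')' then 2 else 3
      match stack with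
      | [] => 0
      | (c, s) :: stack' =>
        if c ≠ opener then 0
        else
          let v : Int := if prev = some opener then factor else factor * s
          match stack' with
          | [] => checkCalcAltLoop rest (some ch) [] (total + v)
          | (c2, p) :: st2 => checkCalcAltLoop rest (some ch) ((c2, p + v) :: st2) total
    else
      checkCalcAltLoop rest (some ch) stack total
termination_by structural cur

def checkCalc_alt (com : String) : Int :=
  checkCalcAltLoop com.toList none [] 0

-- ===== PRECONDITION & SPEC =====
def Spec_checkCalc (com : String) (out : Int) : Prop := out = checkCalc_alt com
instance (com : String) (out : Int) : Decidable (Spec_checkCalc com out) := by unfold Spec_checkCalc; infer_instance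

-- ===== CLAIM (what is proved, stated in full; the proofs are below) =====
def Claim_equal_checkCalc : Prop := ∀ (com : String), Dom_checkCalc com → Spec_checkCalc com (checkCalc com)

-- ===== LEMMAS AND PROOFS =====

/-- factor of an opening bracket -/
def pvFac (c : Char) : Int := if c = '(' then 2 else 3

/-- product of the factors of the open brackets on B's stack (top first) -/
def pvProd : List (Char × Int) → Int
  | [] => 1
  | (c, _) :: rest => pvFac c * pvProd rest

/-- weighted sum: each frame's partial sum times the factor-product from the bottom
    up to and including that frame (stack given top first) -/
def pvW : List (Char × Int) → Int
  | [] => 0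
  | (c, s) :: rest => pvProd rest * pvFac c * s + pvW rest

lemma pvFac_paren : pvFac '(' = 2 := by simp [pvFac]

lemma pvFac_brack : pvFac '[' = 3 := by simp [pvFac]

lemma pvGet_of_drop (l : List Char) (i : Int) (ch : Char) (rest : List Char)
    (hi : 0 ≤ i) (hd : List.drop i.toNat l = ch :: rest) :
    PySem.List.pyGet? l i = some ch := by
  have hlen : i.toNat < l.length := by
    by_contra h
    rw [List.drop_eq_nil_of_le (by omega)] at hd
    simp at hd
  rw [PySem.List.pyGet?_of_nonneg l hi, List.getElem?_eq_getElem hlen]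
  have h0 : (List.drop i.toNat l)[0]'(by simp [hd]) = ch := by simp [hd]
  rw [List.getElem_drop] at h0
  simp only [Option.some.injEq]
  simpa using h0

lemma drop_succ_of_drop (l rest : List Char) (ch : Char) (i : Int) (hi : 0 ≤ i)
    (hd : List.drop i.toNat l = ch :: rest) : List.drop (i + 1).toNat l = rest := by
  have h1 : (i + 1).toNat = i.toNat + 1 := by omega
  rw [h1, ← List.drop_drop (i := 1) (j := i.toNat), hd]
  rfl

lemma key (l : List Char) (cur : List Char) : ∀ (i : Int) (stB : List (Char × Int))
    (total res temp : Int) (prev : Option Char),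
    0 ≤ i →
    List.drop i.toNat l = cur →
    (stB ≠ [] → PySem.List.pyGet? l (i - 1) = prev) →
    (∀ c, prev = some c → (c = '(' ∨ c = '[') → stB.head? = some (c, 0)) →
    res = total + pvW stB →
    temp = pvProd stB →
    (match checkCalcLoop l cur i (stB.map Prod.fst) res temp with
     | (st, r) => if st.isEmpty then r else 0) = checkCalcAltLoop cur prev stB total := by
  induction cur with
  | nil =>
    intro i stB total res temp prev _ _ _ _ hres _
    cases stB with
    | nil => simpa [checkCalcLoop, checkCalcAltLoop, pvW] using hres
    | cons a t => simp [checkCalcLoop, checkCalcAltLoop]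
  | cons ch rest ih =>
    intro i stB total res temp prev hi hd hprev hfresh hres htemp
    have hget : PySem.List.pyGet? l i = some ch := pvGet_of_drop l i ch rest hi hd
    have hd' : List.drop (i + 1).toNat l = rest := drop_succ_of_drop l rest ch i hi hd
    have hi' : (0:Int) ≤ i + 1 := by omega
    have hget' : PySem.List.pyGet? l (i + 1 - 1) = some ch := by simpa using hget
    by_cases h1 : ch = '('
    · subst h1
      have H := ih (i + 1) ((('(', 0)) :: stB) total res (temp * 2) (some '(')
        hi' hd' (fun _ => hget')
        (by intro c hc _; injection hc with hc; subst hc; rfl)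
        (by simp [pvW, pvFac_paren, hres])
        (by simp [pvProd, pvFac_paren, htemp, mul_comm])
      simpa [checkCalcLoop, checkCalcAltLoop] using H
    · by_cases h2 : ch = '['
      · subst h2
        have H := ih (i + 1) ((('[', 0)) :: stB) total res (temp * 3) (some '[')
          hi' hd' (fun _ => hget')
          (by intro c hc _; injection hc with hc; subst hc; rfl)
          (by simp [pvW, pvFac_brack, hres])
          (by simp [pvProd, pvFac_brack, htemp, mul_comm])
        simpa [checkCalcLoop, checkCalcAltLoop] using H
      · by_cases h3 : ch = ')'
        · subst h3
          cases stB with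
          | nil => simp [checkCalcLoop, checkCalcAltLoop]
          | cons top stB' =>
            obtain ⟨c, s⟩ := top
            by_cases hc : c = '('
            · subst hc
              have hpv : PySem.List.pyGet? l (i - 1) = prev := hprev (by simp)
              have htp : temp = 2 * pvProd stB' := by
                simpa [pvProd, pvFac_paren] using htemp
              have hdiv : PySem.Int.floordiv temp 2 = pvProd stB' := by
                rw [htp, PySem.Int.floordiv_eq_ediv_of_pos (by norm_num : (0:Int) < 2)]
                exact Int.mul_ediv_cancel_left _ (by norm_num)
              have hfr : ∀ c, (some ')' : Option Char) = some c → (c = '(' ∨ c = '[') →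
                  ∀ (st0 : List (Char × Int)), st0.head? = some (c, 0) := by
                intro c hc hor
                injection hc with hc; subst hc
                rcases hor with h | h <;> exact absurd h (by decide)
              by_cases hadj : prev = some '('
              · have hs0 : s = 0 := by
                  have h := hfresh '(' hadj (Or.inl rfl)
                  simpa using h
                subst hs0
                cases stB' with
                | nil =>
                  have H := ih (i + 1) [] (total + 2) (res + temp)
                    (PySem.Int.floordiv temp 2) (some ')') hi' hd'
                    (fun h => absurd rfl h)
                    (fun c hc hor => hfr c hc hor [])
                    (by simp [pvW, pvProd, pvFac_paren] at hres htp ⊢; omega)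
                    (by simpa [pvProd] using hdiv)
                  simpa [checkCalcLoop, checkCalcAltLoop, hpv, hadj, htp] using H
                | cons fr st2 =>
                  obtain ⟨c2, p⟩ := fr
                  have H := ih (i + 1) ((c2, p + 2) :: st2) total (res + temp)
                    (PySem.Int.floordiv temp 2) (some ')') hi' hd'
                    (fun _ => hget')
                    (fun c hc hor => hfr c hc hor _)
                    (by simp [pvW, pvProd, pvFac_paren] at hres htp ⊢; rw [hres, htp]; ring)
                    (by simpa [pvProd] using hdiv)
                  simpa [checkCalcLoop, checkCalcAltLoop, hpv, hadj, htp] using H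
              · cases stB' with
                | nil =>
                  have H := ih (i + 1) [] (total + 2 * s) res
                    (PySem.Int.floordiv temp 2) (some ')') hi' hd'
                    (fun h => absurd rfl h)
                    (fun c hc hor => hfr c hc hor [])
                    (by simp [pvW, pvProd, pvFac_paren] at hres ⊢; omega)
                    (by simpa [pvProd] using hdiv)
                  simpa [checkCalcLoop, checkCalcAltLoop, hpv, hadj] using H
                | cons fr st2 =>
                  obtain ⟨c2, p⟩ := fr
                  have H := ih (i + 1) ((c2, p + 2 * s) :: st2) total res
                    (PySem.Int.floordiv temp 2) (some ')') hi' hd'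
                    (fun _ => hget')
                    (fun c hc hor => hfr c hc hor _)
                    (by simp [pvW, pvProd, pvFac_paren] at hres ⊢; rw [hres]; ring)
                    (by simpa [pvProd] using hdiv)
                  simpa [checkCalcLoop, checkCalcAltLoop, hpv, hadj] using H
            · simp [checkCalcLoop, checkCalcAltLoop, hc]
        · by_cases h4 : ch = ']'
          · subst h4
            cases stB with
            | nil => simp [checkCalcLoop, checkCalcAltLoop]
            | cons top stB' =>
              obtain ⟨c, s⟩ := top
              by_cases hc : c = '['
              · subst hc
                have hpv : PySem.List.pyGet? l (i - 1) = prev := hprev (by simp)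
                have htp : temp = 3 * pvProd stB' := by
                  simpa [pvProd, pvFac_brack] using htemp
                have hdiv : PySem.Int.floordiv temp 3 = pvProd stB' := by
                  rw [htp, PySem.Int.floordiv_eq_ediv_of_pos (by norm_num : (0:Int) < 3)]
                  exact Int.mul_ediv_cancel_left _ (by norm_num)
                have hfr : ∀ c, (some ']' : Option Char) = some c → (c = '(' ∨ c = '[') →
                    ∀ (st0 : List (Char × Int)), st0.head? = some (c, 0) := by
                  intro c hc hor
                  injection hc with hc; subst hc
                  rcases hor with h | h <;> exact absurd h (by decide)
                by_cases hadj : prev = some '['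
                · have hs0 : s = 0 := by
                    have h := hfresh '[' hadj (Or.inr rfl)
                    simpa using h
                  subst hs0
                  cases stB' with
                  | nil =>
                    have H := ih (i + 1) [] (total + 3) (res + temp)
                      (PySem.Int.floordiv temp 3) (some ']') hi' hd'
                      (fun h => absurd rfl h)
                      (fun c hc hor => hfr c hc hor [])
                      (by simp [pvW, pvProd, pvFac_brack] at hres htp ⊢; omega)
                      (by simpa [pvProd] using hdiv)
                    simpa [checkCalcLoop, checkCalcAltLoop, hpv, hadj, htp] using H
                  | cons fr st2 =>
                    obtain ⟨c2, p⟩ := fr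
                    have H := ih (i + 1) ((c2, p + 3) :: st2) total (res + temp)
                      (PySem.Int.floordiv temp 3) (some ']') hi' hd'
                      (fun _ => hget')
                      (fun c hc hor => hfr c hc hor _)
                      (by simp [pvW, pvProd, pvFac_brack] at hres htp ⊢; rw [hres, htp]; ring)
                      (by simpa [pvProd] using hdiv)
                    simpa [checkCalcLoop, checkCalcAltLoop, hpv, hadj, htp] using H
                · cases stB' with
                  | nil =>
                    have H := ih (i + 1) [] (total + 3 * s) res
                      (PySem.Int.floordiv temp 3) (some ']') hi' hd'
                      (fun h => absurd rfl h)
                      (fun c hc hor => hfr c hc hor [])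
                      (by simp [pvW, pvProd, pvFac_brack] at hres ⊢; omega)
                      (by simpa [pvProd] using hdiv)
                    simpa [checkCalcLoop, checkCalcAltLoop, hpv, hadj] using H
                  | cons fr st2 =>
                    obtain ⟨c2, p⟩ := fr
                    have H := ih (i + 1) ((c2, p + 3 * s) :: st2) total res
                      (PySem.Int.floordiv temp 3) (some ']') hi' hd'
                      (fun _ => hget')
                      (fun c hc hor => hfr c hc hor _)
                      (by simp [pvW, pvProd, pvFac_brack] at hres ⊢; rw [hres]; ring)
                      (by simpa [pvProd] using hdiv)
                    simpa [checkCalcLoop, checkCalcAltLoop, hpv, hadj] using H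
              · simp [checkCalcLoop, checkCalcAltLoop, hc]
          · have H := ih (i + 1) stB total res temp (some ch) hi' hd'
              (fun _ => hget')
              (by intro c hc hor
                  injection hc with hc; subst hc
                  rcases hor with h | h
                  · exact absurd h h1
                  · exact absurd h h2)
              hres htemp
            simpa [checkCalcLoop, checkCalcAltLoop, h1, h2, h3, h4] using H

-- ===== VERDICT (by name: the statement is the Claim_ definition above) =====
theorem checkCalc_spec : Claim_equal_checkCalc := by
  intro com _
  unfold Spec_checkCalc checkCalc checkCalc_alt
  have H := key com.toList com.toList 0 [] 0 0 1 none (le_refl 0) (by simp)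
    (fun h => absurd rfl h) (by intro c hc _; simp at hc)
    (by simp [pvW]) (by simp [pvProd])
  simpa using H
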